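-- pv_equiv track=rewrite | github.com/AlifSrSE/ProblemSolves | 12D-ball.py | count_self_murderers
-- ===== SOURCE A (Python) =====
-- def count_self_murderers(n, beauty, intellect, richness):
--     ladies = list(zip(beauty, intellect, richness))
--
--     count = 0
--     for i in range(n):
--         is_self_murderer = False
--         for j in range(n):
--             if (ladies[j][0] > ladies[i][0] and
--                 ladies[j][1] > ladies[i][1] and
--                 ladies[j][2] > ladies[i][2]):
--                 is_self_murderer = True
--                 break
--         if is_self_murderer:
--             count += 1
--
--     return count
-- ===== SOURCE B (Python) =====
-- def count_self_murderers(n, beauty, intellect, richness):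
--     # Sort by beauty descending; sweep in batches of equal beauty keeping the
--     # (intellect, richness) pairs of all strictly-more-beautiful ladies seen so far.
--     ladies = [(beauty[k], intellect[k], richness[k]) for k in range(n)]
--     ladies.sort(key=lambda t: t[0], reverse=True)
--     count = 0
--     seen = []  # (intellect, richness) of every lady with strictly greater beauty
--     start = 0
--     while start < len(ladies):
--         stop = start
--         while stop < len(ladies) and ladies[stop][0] == ladies[start][0]:
--             stop += 1
--         for _, i, r in ladies[start:stop]:
--             if any(ii > i and rr > r for ii, rr in seen):
--                 count += 1
--         for _, i, r in ladies[start:stop]: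
--             seen.append((i, r))
--         start = stop
--     return count
-- ===== Notes on version B (the rewrite author's own statement) =====
-- stated objective: alternative
-- what changed: Replaces the all-pairs double scan by a sort-by-beauty-descending sweep: ladies are processed in batches of equal beauty against an accumulated list of (intellect, richness) pairs of strictly more beautiful ladies, so beauty never needs to be re-compared pairwise.
import Mathlib
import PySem

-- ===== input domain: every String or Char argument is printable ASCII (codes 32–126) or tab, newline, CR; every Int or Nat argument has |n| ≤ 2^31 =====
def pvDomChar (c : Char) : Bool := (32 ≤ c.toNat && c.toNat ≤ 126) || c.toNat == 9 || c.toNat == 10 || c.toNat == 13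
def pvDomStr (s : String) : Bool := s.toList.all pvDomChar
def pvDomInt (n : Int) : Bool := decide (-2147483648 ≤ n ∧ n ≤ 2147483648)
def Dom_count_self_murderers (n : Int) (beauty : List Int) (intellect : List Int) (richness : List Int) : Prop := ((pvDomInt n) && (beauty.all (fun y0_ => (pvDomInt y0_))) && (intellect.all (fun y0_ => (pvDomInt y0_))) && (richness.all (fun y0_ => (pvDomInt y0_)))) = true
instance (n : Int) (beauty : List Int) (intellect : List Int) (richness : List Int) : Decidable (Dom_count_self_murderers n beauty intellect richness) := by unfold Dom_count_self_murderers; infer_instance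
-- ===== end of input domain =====

-- B replaces A's all-pairs double scan by a sort-by-beauty-descending sweep in
-- equal-beauty batches against the accumulated (intellect, richness) pairs of
-- strictly more beautiful ladies (objective: alternative algorithm, same worst-case cost).


-- ===== PORT A =====
-- inner loop: 'for j in range(n): if ladies[j] dominates ladies[i]: flag = True; break'
def pvInnerA (ladies : List (Int × Int × Int)) (li : Int × Int × Int) : List Int → Bool
  | [] => false
  | j :: js =>
      let lj := PySem.List.pyGetD ladies j (0, 0, 0)
      if li.1 < lj.1 && li.2.1 < lj.2.1 && li.2.2 < lj.2.2 then true
      else pvInnerA ladies li js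

def count_self_murderers (n : Int) (beauty : List Int) (intellect : List Int) (richness : List Int) : Int :=
  let ladies := beauty.zip (intellect.zip richness)
  (PySem.List.pyRange 0 n 1).foldl (fun count i =>
    let li := PySem.List.pyGetD ladies i (0, 0, 0)
    let is_self_murderer := pvInnerA ladies li (PySem.List.pyRange 0 n 1)
    if is_self_murderer then count + 1 else count) 0

-- ===== PORT B =====
-- 'any(ii > i and rr > r for ii, rr in seen)'
def pvSeenAny (seen : List (Int × Int)) (i r : Int) : Bool :=
  seen.any (fun p => i < p.1 && r < p.2)

-- the outer while loop of B: peel one batch of equal beauty, count, extend seen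
-- fuel (initialised to the list length) only makes the while loop structurally
-- recursive; it is never exhausted on the actual call
def pvGroupsB : Nat → List (Int × Int × Int) → List (Int × Int) → Int → Int
  | _, [], _, count => count
  | 0, _ :: _, _, count => count
  | fuel + 1, t :: rest, seen, count =>
      let grp := t :: rest.takeWhile (fun u => u.1 == t.1)
      let count' := grp.foldl (fun c u => if pvSeenAny seen u.2.1 u.2.2 then c + 1 else c) count
      let seen' := seen ++ grp.map (fun u => (u.2.1, u.2.2))
      pvGroupsB fuel (rest.dropWhile (fun u => u.1 == t.1)) seen' count'

def count_self_murderers_alt (n : Int) (beauty : List Int) (intellect : List Int) (richness : List Int) : Int :=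
  let ladies := (PySem.List.pyRange 0 n 1).map (fun k =>
      (PySem.List.pyGetD beauty k 0, PySem.List.pyGetD intellect k 0, PySem.List.pyGetD richness k 0))
  let sortedLadies := PySem.List.sorted ladies (fun t => t.1) true
  pvGroupsB sortedLadies.length sortedLadies [] 0

-- ===== PRECONDITION & SPEC =====
-- A raises IndexError exactly when n exceeds the length of zip(beauty, intellect, richness); Pre_ excludes those inputs.
def Pre_count_self_murderers (n : Int) (beauty : List Int) (intellect : List Int) (richness : List Int) : Prop :=
  n ≤ (beauty.length : Int) ∧ n ≤ (intellect.length : Int) ∧ n ≤ (richness.length : Int)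
instance (n : Int) (beauty : List Int) (intellect : List Int) (richness : List Int) : Decidable (Pre_count_self_murderers n beauty intellect richness) := by unfold Pre_count_self_murderers; infer_instance

def pvWitness_count_self_murderers : Int × List Int × List Int × List Int := (2, [1, 2], [2, 1], [1, 3])

def Spec_count_self_murderers (n : Int) (beauty : List Int) (intellect : List Int) (richness : List Int) (out : Int) : Prop := out = count_self_murderers_alt n beauty intellect richness
instance (n : Int) (beauty : List Int) (intellect : List Int) (richness : List Int) (out : Int) : Decidable (Spec_count_self_murderers n beauty intellect richness out) := by unfold Spec_count_self_murderers; infer_instance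

-- ===== CLAIM (what is proved, stated in full; the proofs are below) =====
def Claim_equal_count_self_murderers : Prop := ∀ (n : Int) (beauty : List Int) (intellect : List Int) (richness : List Int), Dom_count_self_murderers n beauty intellect richness → Pre_count_self_murderers n beauty intellect richness → Spec_count_self_murderers n beauty intellect richness (count_self_murderers n beauty intellect richness)

-- ===== LEMMAS AND PROOFS =====

-- strict three-way domination: u dominates t
def pvBeats (t u : Int × Int × Int) : Bool :=
  t.1 < u.1 && t.2.1 < u.2.1 && t.2.2 < u.2.2

-- the common specification: how many elements of L are dominated by some element of L
def pvSpec (L : List (Int × Int × Int)) : Int :=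
  (L.countP (fun t => L.any (fun u => pvBeats t u)) : Int)

theorem pvInnerA_eq_any (ladies : List (Int × Int × Int)) (li : Int × Int × Int) (js : List Int) :
    pvInnerA ladies li js = js.any (fun j => pvBeats li (PySem.List.pyGetD ladies j (0, 0, 0))) := by
  induction js with
  | nil => rfl
  | cons j js ih =>
      simp only [pvInnerA, pvBeats, List.any_cons, ih]
      split
      · rename_i h; simp [h]
      · rename_i h; rw [Bool.not_eq_true] at h; simp [h]

theorem pv_any_congr_mem {α : Type} {l : List α} {p q : α → Bool}
    (h : ∀ a ∈ l, p a = q a) : l.any p = l.any q := by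
  induction l with
  | nil => rfl
  | cons x xs ih =>
      simp only [List.any_cons, h x (List.mem_cons_self ..),
        ih (fun a ha => h a (List.mem_cons_of_mem _ ha))]

theorem pv_mapRange (xs : List (Int × Int × Int)) (m : ℕ) (hm : m ≤ xs.length) :
    (PySem.List.pyRange 0 (m : Int) 1).map (fun j => PySem.List.pyGetD xs j (0, 0, 0)) = xs.take m := by
  induction m with
  | zero => simp
  | succ k ih =>
      have h0 : (0 : Int) ≤ (k : Int) := by positivity
      have hcast : ((k + 1 : ℕ) : Int) = (k : Int) + 1 := by push_cast; ring
      have hklt : k < xs.length := by omega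
      have h1 : PySem.List.pyGetD xs ((k : ℕ) : Int) (0, 0, 0) = xs[k] := by
        rw [PySem.List.pyGetD_natCast]; exact List.getD_eq_getElem xs _ hklt
      rw [hcast, PySem.List.pyRange_one_succ_right h0, List.map_append, ih (by omega),
        List.take_add_one, List.getElem?_eq_getElem hklt]
      simp [h1]

theorem pv_foldl_count (L : List (Int × Int × Int)) (p : Int × Int × Int → Bool) (c : Int) :
    L.foldl (fun c u => if p u then c + 1 else c) c = c + (L.countP p : Int) := by
  induction L generalizing c with
  | nil => simp
  | cons t L ih =>
      simp only [List.foldl_cons, List.countP_cons, ih]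
      split <;> simp_all <;> push_cast <;> ring

-- A computes pvSpec of the first n ladies
theorem pvA_eq (n : Int) (beauty intellect richness : List Int)
    (h : Pre_count_self_murderers n beauty intellect richness) :
    count_self_murderers n beauty intellect richness
      = pvSpec ((beauty.zip (intellect.zip richness)).take n.toNat) := by
  obtain ⟨h1, h2, h3⟩ := h
  set zs := beauty.zip (intellect.zip richness) with hzs
  by_cases hn : n ≤ 0
  · have : n.toNat = 0 := by omega
    simp [count_self_murderers, pvSpec, PySem.List.pyRange_one_eq_nil hn, this]
  · have hmn : ((n.toNat : ℕ) : Int) = n := by omega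
    have hlen : n.toNat ≤ zs.length := by
      simp [hzs, List.length_zip]; omega
    have hmap := pv_mapRange zs n.toNat hlen
    rw [hmn] at hmap
    unfold count_self_murderers
    rw [← hzs]
    have hfold : ∀ (P : Int × Int × Int → Bool) (c : Int),
        (PySem.List.pyRange 0 n 1).foldl
          (fun count i => if P (PySem.List.pyGetD zs i (0, 0, 0)) then count + 1 else count) c
          = (zs.take n.toNat).foldl (fun count u => if P u then count + 1 else count) c := by
      intro P c
      rw [← hmap, List.foldl_map]
    simp only [pvInnerA_eq_any]
    rw [hfold (fun li => (PySem.List.pyRange 0 n 1).any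
          (fun j => pvBeats li (PySem.List.pyGetD zs j (0, 0, 0)))) 0]
    rw [pv_foldl_count, zero_add]
    unfold pvSpec
    norm_cast
    apply List.countP_congr
    intro t _
    rw [← hmap, List.any_map]
    exact Iff.rfl

-- every element of dropWhile (·.1 == x) of a beauty-nonincreasing list whose elements
-- all have beauty ≤ x has beauty strictly below x
theorem pv_dropWhile_lt (l : List (Int × Int × Int)) (x : Int)
    (hpw : l.Pairwise (fun a b => b.1 ≤ a.1)) (hle : ∀ u ∈ l, u.1 ≤ x) :
    ∀ v ∈ l.dropWhile (fun u => u.1 == x), v.1 < x := by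
  induction l with
  | nil => simp
  | cons h tl ih =>
      rw [List.dropWhile_cons]
      split
      · exact ih hpw.of_cons (fun u hu => hle u (List.mem_cons_of_mem _ hu))
      · rename_i hne
        intro v hv
        rcases List.mem_cons.mp hv with rfl | hv
        · have := hle v (List.mem_cons_self ..)
          simp only [beq_iff_eq] at hne; omega
        · have hvh : v.1 ≤ h.1 := (List.pairwise_cons.mp hpw).1 v hv
          have := hle h (List.mem_cons_self ..)
          simp only [beq_iff_eq] at hne; omega

-- the sweep invariant: on a beauty-nonincreasing list, pvGroupsB counts the elements
-- dominated either by a 'seen' pair or by a list element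
theorem pvGroupsB_eq (fuel : Nat) (l : List (Int × Int × Int)) (seen : List (Int × Int)) (c : Int)
    (hpw : l.Pairwise (fun a b => b.1 ≤ a.1)) (hfuel : l.length ≤ fuel) :
    pvGroupsB fuel l seen c
      = c + (l.countP (fun t => pvSeenAny seen t.2.1 t.2.2 || l.any (fun u => pvBeats t u)) : Int) := by
  induction fuel generalizing l seen c with
  | zero =>
      have : l = [] := List.length_eq_zero_iff.mp (by omega)
      subst this; simp [pvGroupsB]
  | succ fuel ih =>
  cases l with
  | nil => simp [pvGroupsB]
  | cons t rest =>
    set tw := rest.takeWhile (fun u => u.1 == t.1) with htw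
    set rd := rest.dropWhile (fun u => u.1 == t.1) with hrd
    have hsplit : rest = tw ++ rd := (List.takeWhile_append_dropWhile ..).symm
    set grp : List (Int × Int × Int) := t :: tw with hgrp
    have hlsplit : t :: rest = grp ++ rd := by rw [hgrp, hsplit]; rfl
    -- beauty facts
    have hgrpb : ∀ u ∈ grp, u.1 = t.1 := by
      intro u hu
      rcases List.mem_cons.mp hu with rfl | hu
      · rfl
      · simpa using List.mem_takeWhile_imp hu
    have hrestle : ∀ u ∈ rest, u.1 ≤ t.1 := (List.pairwise_cons.mp hpw).1
    have hrdb : ∀ v ∈ rd, v.1 < t.1 :=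
      pv_dropWhile_lt rest t.1 hpw.of_cons hrestle
    have hrdpw : rd.Pairwise (fun a b => b.1 ≤ a.1) :=
      hpw.of_cons.sublist (List.dropWhile_sublist _)
    have hrdfuel : rd.length ≤ fuel := by
      have h := List.Sublist.length_le (List.dropWhile_sublist (l := rest) (fun u => u.1 == t.1))
      rw [hrd]
      simp only [List.length_cons] at hfuel
      omega
    -- one step of the sweep
    have hstep : pvGroupsB (fuel + 1) (t :: rest) seen c
        = pvGroupsB fuel rd (seen ++ grp.map (fun u => (u.2.1, u.2.2)))
            (grp.foldl (fun c u => if pvSeenAny seen u.2.1 u.2.2 then c + 1 else c) c) := by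
      rw [pvGroupsB]
    rw [hstep, ih rd _ _ hrdpw hrdfuel, pv_foldl_count]
    -- rewrite the target count over grp ++ rd
    rw [hlsplit, List.countP_append]
    have hgrpP : grp.countP
        (fun t' => pvSeenAny seen t'.2.1 t'.2.2 || (grp ++ rd).any (fun u => pvBeats t' u))
        = grp.countP (fun u => pvSeenAny seen u.2.1 u.2.2) := by
      apply List.countP_congr
      intro t' ht'
      have hb : t'.1 = t.1 := hgrpb t' ht'
      have hnone : (grp ++ rd).any (fun u => pvBeats t' u) = false := by
        simp only [List.any_eq_false]
        intro u hu
        rcases List.mem_append.mp hu with hu | hu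
        · have := hgrpb u hu
          simp [pvBeats]; omega
        · have := hrdb u hu
          simp [pvBeats]; omega
      rw [hnone, Bool.or_false]
    have hrdP : rd.countP
        (fun v => pvSeenAny (seen ++ grp.map (fun u => (u.2.1, u.2.2))) v.2.1 v.2.2
            || rd.any (fun u => pvBeats v u))
        = rd.countP
        (fun v => pvSeenAny seen v.2.1 v.2.2 || (grp ++ rd).any (fun u => pvBeats v u)) := by
      apply List.countP_congr
      intro v hv
      have hvb : v.1 < t.1 := hrdb v hv
      have hseen' : pvSeenAny (seen ++ grp.map (fun u => (u.2.1, u.2.2))) v.2.1 v.2.2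
          = (pvSeenAny seen v.2.1 v.2.2 || grp.any (fun u => pvBeats v u)) := by
        simp only [pvSeenAny, List.any_append, List.any_map]
        congr 1
        apply pv_any_congr_mem
        intro u hu
        have hut := hgrpb u hu
        have hvu : v.1 < u.1 := by omega
        simp [Function.comp, pvBeats, hvu]
      rw [hseen', List.any_append]
      cases hs : pvSeenAny seen v.2.1 v.2.2 <;>
        cases hg : grp.any (fun u => pvBeats v u) <;>
        cases hr : rd.any (fun u => pvBeats v u) <;> simp
    rw [hgrpP, hrdP]
    push_cast
    ring

-- B computes pvSpec of the sorted list
theorem pvB_eq (n : Int) (beauty intellect richness : List Int) :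
    count_self_murderers_alt n beauty intellect richness
      = pvSpec (PySem.List.sorted
          ((PySem.List.pyRange 0 n 1).map (fun k =>
            (PySem.List.pyGetD beauty k 0, PySem.List.pyGetD intellect k 0,
              PySem.List.pyGetD richness k 0))) (fun t => t.1) true) := by
  unfold count_self_murderers_alt
  set L := (PySem.List.pyRange 0 n 1).map (fun k =>
      (PySem.List.pyGetD beauty k 0, PySem.List.pyGetD intellect k 0,
        PySem.List.pyGetD richness k 0))
  have hpw : (PySem.List.sorted L (fun t => t.1) true).Pairwise (fun a b => b.1 ≤ a.1) :=
    PySem.List.sorted_pairwise_rev L (fun t => t.1)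
  rw [pvGroupsB_eq _ _ [] 0 hpw le_rfl]
  simp [pvSpec, pvSeenAny]

-- pvSpec depends only on the multiset of ladies
theorem pvSpec_perm {L L' : List (Int × Int × Int)} (h : L.Perm L') : pvSpec L = pvSpec L' := by
  unfold pvSpec
  congr 1
  have hany : ∀ t, L.any (fun u => pvBeats t u) = L'.any (fun u => pvBeats t u) := by
    intro t
    cases ha : L'.any (fun u => pvBeats t u)
    · simp only [List.any_eq_false] at ha ⊢
      exact fun u hu => ha u (h.mem_iff.mp hu)
    · simp only [List.any_eq_true] at ha ⊢
      obtain ⟨u, hu, hd⟩ := ha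
      exact ⟨u, h.mem_iff.mpr hu, hd⟩
  calc L.countP (fun t => L.any (fun u => pvBeats t u))
      = L.countP (fun t => L'.any (fun u => pvBeats t u)) :=
        List.countP_congr (fun t _ => by rw [hany t])
    _ = L'.countP (fun t => L'.any (fun u => pvBeats t u)) := h.countP_eq _

-- B's comprehension builds exactly the first n ladies of A's zip
theorem pvLists_eq (n : Int) (beauty intellect richness : List Int)
    (h : Pre_count_self_murderers n beauty intellect richness) :
    (PySem.List.pyRange 0 n 1).map (fun k =>
        (PySem.List.pyGetD beauty k 0, PySem.List.pyGetD intellect k 0,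
          PySem.List.pyGetD richness k 0))
      = (beauty.zip (intellect.zip richness)).take n.toNat := by
  obtain ⟨h1, h2, h3⟩ := h
  set zs := beauty.zip (intellect.zip richness) with hzs
  have hzlen : zs.length = min beauty.length (min intellect.length richness.length) := by
    simp [hzs, List.length_zip]
  by_cases hn : n ≤ 0
  · have : n.toNat = 0 := by omega
    simp [PySem.List.pyRange_one_eq_nil hn, this]
  · have hmn : ((n.toNat : ℕ) : Int) = n := by omega
    rw [← hmn]
    apply List.ext_getElem?
    intro k
    by_cases hk : k < n.toNat
    · have hkb : k < beauty.length := by omega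
      have hki : k < intellect.length := by omega
      have hkr : k < richness.length := by omega
      have hkz : k < zs.length := by omega
      rw [PySem.List.getElem?_map_pyRange_zero _ _ _ hk, List.getElem?_take,
        if_pos (show k < ((n.toNat : Int)).toNat by omega),
        List.getElem?_eq_getElem hkz]
      have hb : PySem.List.pyGetD beauty ((k : ℕ) : Int) 0 = beauty[k] := by
        rw [PySem.List.pyGetD_natCast]; exact List.getD_eq_getElem beauty _ hkb
      have hi : PySem.List.pyGetD intellect ((k : ℕ) : Int) 0 = intellect[k] := by
        rw [PySem.List.pyGetD_natCast]; exact List.getD_eq_getElem intellect _ hki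
      have hr : PySem.List.pyGetD richness ((k : ℕ) : Int) 0 = richness[k] := by
        rw [PySem.List.pyGetD_natCast]; exact List.getD_eq_getElem richness _ hkr
      simp [hb, hi, hr, hzs, List.getElem_zip]
    · have hlen1 : ((PySem.List.pyRange 0 ((n.toNat : ℕ) : Int) 1).map (fun k =>
          (PySem.List.pyGetD beauty k 0, PySem.List.pyGetD intellect k 0,
            PySem.List.pyGetD richness k 0))).length = n.toNat := by
        rw [List.length_map, PySem.List.length_pyRange_one]; omega
      rw [List.getElem?_eq_none (by omega), List.getElem?_eq_none]
      simp only [List.length_take]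
      omega

-- ===== VERDICT (by name: the statement is the Claim_ definition above) =====
theorem count_self_murderers_spec : Claim_equal_count_self_murderers := by
  intro n beauty intellect richness _ hpre
  unfold Spec_count_self_murderers
  rw [pvA_eq n beauty intellect richness hpre, pvB_eq n beauty intellect richness,
      pvLists_eq n beauty intellect richness hpre]
  exact pvSpec_perm (PySem.List.sorted_perm _ _ _).symm
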